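-- pv_equiv track=rewrite | github.com/UsmanTung/AdventOfCode | 2025/day1/dayone.py | sumZeroes
-- ===== SOURCE A (Python) =====
-- def sumZeroes(data):
--     total = 0
--     curr = 50
--     for line in data:
--         if line[0] == "L":
--             total -= (curr - int(line[1:])) // 100
--             if curr == 0:
--                 total -= 1
--             curr = (curr - int(line[1:])) % 100
--             if curr == 0:
--                 total += 1
--         else:
--             total += (curr + int(line[1:])) // 100
--             curr  = (curr + int(line[1:])) % 100
--     return total
-- ===== SOURCE B (Python) =====
-- def hits(p, q, s):
--     # multiples of 100 touched on the move from p to q (landing on one counts,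
--     # starting from one does not); leftward moves are reflected to rightward ones
--     if s < 0:
--         p, q = -p, -q
--     return q // 100 - p // 100
--
--
-- def sumZeroes(data):
--     # pass 1: parse every move into (direction sign, magnitude)
--     moves = [(-1 if line[0] == "L" else 1, int(line[1:])) for line in data]
--     # pass 2: the absolute position before/after every move
--     positions = [50]
--     for s, n in moves:
--         positions.append(positions[-1] + s * n)
--     # pass 3: count the hundred-boundary hits of every move
--     return sum(hits(p, q, s) for (s, _), p, q in zip(moves, positions, positions[1:]))
-- ===== Notes on version B (the rewrite author's own statement) =====
-- stated objective: alternative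
-- what changed: B restructures the single stateful mod-100 loop with carry fix-ups into three staged passes: parse all moves to (sign, magnitude) pairs, build the list of absolute positions, then sum a direction-normalised (reflection for leftward moves) hundred-boundary hit count per trajectory segment.
-- outside the precondition, e.g. on sumZeroes(['']): A raises IndexError, B raises IndexError; on sumZeroes(['Lx']): A raises ValueError, B raises ValueError
import Mathlib
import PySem

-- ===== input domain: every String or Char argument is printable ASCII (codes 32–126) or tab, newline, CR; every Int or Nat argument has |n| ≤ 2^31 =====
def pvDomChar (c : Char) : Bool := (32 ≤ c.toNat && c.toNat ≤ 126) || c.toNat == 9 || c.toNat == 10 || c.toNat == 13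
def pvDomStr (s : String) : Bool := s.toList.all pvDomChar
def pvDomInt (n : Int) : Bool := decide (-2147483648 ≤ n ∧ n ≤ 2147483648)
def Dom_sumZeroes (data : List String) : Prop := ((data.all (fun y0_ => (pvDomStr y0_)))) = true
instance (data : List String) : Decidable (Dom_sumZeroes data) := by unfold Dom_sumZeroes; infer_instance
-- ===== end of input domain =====

-- B replaces A's single stateful mod-100 loop with carry fix-ups by three staged passes
-- (parse moves, build the absolute-position trajectory, sum reflection-normalised
-- boundary-hit counts per segment); objective: alternative decomposition, same cost.

-- ===== PORT A =====
-- one iteration of A's loop over `line`, state = (total, curr);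
-- line[1:] is line.toList.drop 1 (exact: slice from 1); parse failure / empty line = exception, outside Pre_
def sumZeroesStepA (st : Int × Int) (line : String) : Int × Int :=
  match PySem.Str.pyGet? line 0 with                       -- line[0] (IndexError → none)
  | none => st
  | some c =>
    match PySem.Int.ofChars? (line.toList.drop 1) with     -- int(line[1:]) (ValueError → none)
    | none => st
    | some n =>
      if c = 'L' then
        let total := st.1 - PySem.Int.floordiv (st.2 - n) 100
        let total := if st.2 = 0 then total - 1 else total
        let curr := PySem.Int.mod (st.2 - n) 100
        let total := if curr = 0 then total + 1 else total
        (total, curr)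
      else
        (st.1 + PySem.Int.floordiv (st.2 + n) 100, PySem.Int.mod (st.2 + n) 100)

def sumZeroes (data : List String) : Int :=
  (data.foldl sumZeroesStepA (0, 50)).1

-- ===== PORT B =====
-- helper `hits` of Source B
def sumZeroesHits (p q s : Int) : Int :=
  if s < 0 then PySem.Int.floordiv (-q) 100 - PySem.Int.floordiv (-p) 100
  else PySem.Int.floordiv q 100 - PySem.Int.floordiv p 100

-- pass 1: the parse comprehension; none = the comprehension raises (empty line or non-int tail)
def sumZeroesParse (line : String) : Option (Int × Int) :=
  match PySem.Str.pyGet? line 0 with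
  | none => none
  | some c => (PySem.Int.ofChars? (line.toList.drop 1)).map
      (fun n => (if c = 'L' then (-1 : Int) else 1, n))

def sumZeroesMoves : List String → Option (List (Int × Int))
  | [] => some []
  | line :: rest =>
    match sumZeroesParse line, sumZeroesMoves rest with
    | some m, some ms => some (m :: ms)
    | _, _ => none

-- pass 2: the positions appended after the initial 50 (positions = 50 :: this)
def sumZeroesScan (pos : Int) : List (Int × Int) → List Int
  | [] => []
  | (s, n) :: rest => (pos + s * n) :: sumZeroesScan (pos + s * n) rest

def sumZeroes_alt (data : List String) : Int :=
  match sumZeroesMoves data with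
  | none => 0                                              -- the comprehension raises: outside Pre_
  | some moves =>
    let positions := 50 :: sumZeroesScan 50 moves
    -- pass 3: sum(hits(p, q, s) for (s, _), p, q in zip(moves, positions, positions[1:]))
    ((moves.zip (positions.zip positions.tail)).map
      (fun x => sumZeroesHits x.2.1 x.2.2 x.1.1)).sum

-- ===== PRECONDITION & SPEC =====
-- Pre_ excludes exactly the inputs where Python A raises: an empty line (IndexError on line[0])
-- or a line whose tail is not an int literal (ValueError on int(line[1:])).
def Pre_sumZeroes (data : List String) : Prop :=
  ∀ line ∈ data, line ≠ "" ∧ (PySem.Int.ofChars? (line.toList.drop 1)).isSome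
instance (data : List String) : Decidable (Pre_sumZeroes data) := by unfold Pre_sumZeroes; infer_instance
def pvWitness_sumZeroes : List String := (["L10", "R5", "L-3", "R120"])

def Spec_sumZeroes (data : List String) (out : Int) : Prop := out = sumZeroes_alt data
instance (data : List String) (out : Int) : Decidable (Spec_sumZeroes data out) := by unfold Spec_sumZeroes; infer_instance

-- ===== CLAIM (what is proved, stated in full; the proofs are below) =====
def Claim_equal_sumZeroes : Prop := ∀ (data : List String), Dom_sumZeroes data → Pre_sumZeroes data → Spec_sumZeroes data (sumZeroes data)

-- ===== LEMMAS AND PROOFS =====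

-- proof-only recursion: total boundary hits of the trajectory from `pos` through `moves`
def bTotal (pos : Int) : List (Int × Int) → Int
  | [] => 0
  | (s, n) :: rest => sumZeroesHits pos (pos + s * n) s + bTotal (pos + s * n) rest

theorem zipsum_eq_bTotal (moves : List (Int × Int)) (pos : Int) :
    ((moves.zip ((pos :: sumZeroesScan pos moves).zip (sumZeroesScan pos moves))).map
      (fun x => sumZeroesHits x.2.1 x.2.2 x.1.1)).sum = bTotal pos moves := by
  induction moves generalizing pos with
  | nil => rfl
  | cons m rest ih =>
    obtain ⟨s, n⟩ := m
    simp only [sumZeroesScan, bTotal, List.zip_cons_cons, List.map_cons, List.sum_cons]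
    rw [ih (pos + s * n)]

-- a successful parse exposes the first char and the parsed tail
theorem parse_some_elim (line : String) (s n : Int)
    (hp : sumZeroesParse line = some (s, n)) :
    ∃ c cs, line.toList = c :: cs ∧ PySem.Int.ofChars? cs = some n ∧
      (if c = 'L' then (-1 : Int) else 1) = s := by
  cases hl : line.toList with
  | nil => simp [sumZeroesParse, pysem, hl] at hp
  | cons c cs =>
    refine ⟨c, cs, rfl, ?_⟩
    have hg : PySem.Str.pyGet? line 0 = some c := by simp [pysem, hl]
    simp only [sumZeroesParse, hg, hl] at hp
    cases hn : PySem.Int.ofChars? (List.drop 1 (c :: cs)) with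
    | none => rw [hn] at hp; simp at hp
    | some n' =>
      rw [hn] at hp
      simp only [Option.map_some, Option.some.injEq, Prod.mk.injEq] at hp
      simp only [List.drop_succ_cons, List.drop_zero] at hn
      exact ⟨by rw [hn, hp.2], hp.1⟩

-- one A-step from curr = pos % 100 adds exactly the hit count of the segment and
-- moves the counter to (pos + s*n) % 100
theorem stepA_eq (line : String) (c : Char) (cs : List Char) (t pos n : Int)
    (hl : line.toList = c :: cs) (hn : PySem.Int.ofChars? cs = some n) :
    sumZeroesStepA (t, PySem.Int.mod pos 100) line
      = (t + sumZeroesHits pos (pos + (if c = 'L' then (-1 : Int) else 1) * n)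
               (if c = 'L' then (-1 : Int) else 1),
         PySem.Int.mod (pos + (if c = 'L' then (-1 : Int) else 1) * n) 100) := by
  have hg : PySem.Str.pyGet? line 0 = some c := by simp [pysem, hl]
  have hd : PySem.Int.ofChars? (line.toList.drop 1) = some n := by simp [hl, hn]
  have h100 : (0:Int) < 100 := by norm_num
  by_cases hL : c = 'L'
  · simp only [sumZeroesStepA, sumZeroesHits, hg, hd, hL, reduceIte,
      PySem.Int.floordiv_eq_ediv_of_pos h100, PySem.Int.mod_eq_emod_of_pos h100]
    refine Prod.ext ?_ ?_ <;> simp <;> (try split_ifs) <;> omega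
  · simp only [sumZeroesStepA, sumZeroesHits, hg, hd, hL, reduceIte,
      PySem.Int.floordiv_eq_ediv_of_pos h100, PySem.Int.mod_eq_emod_of_pos h100]
    refine Prod.ext ?_ ?_ <;> simp <;> omega

theorem foldA_eq_bTotal (data : List String) (moves : List (Int × Int)) (t pos : Int)
    (hm : sumZeroesMoves data = some moves) :
    (data.foldl sumZeroesStepA (t, PySem.Int.mod pos 100)).1 = t + bTotal pos moves := by
  induction data generalizing moves t pos with
  | nil =>
    simp only [sumZeroesMoves, Option.some.injEq] at hm
    subst hm; simp [bTotal]
  | cons line rest ih =>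
    unfold sumZeroesMoves at hm
    cases hp : sumZeroesParse line with
    | none => rw [hp] at hm; simp at hm
    | some m =>
      rw [hp] at hm
      cases hr : sumZeroesMoves rest with
      | none => rw [hr] at hm; simp at hm
      | some ms =>
        rw [hr] at hm
        simp only [Option.some.injEq] at hm
        subst hm
        obtain ⟨s, n⟩ := m
        obtain ⟨c, cs, hl, hn, hs⟩ := parse_some_elim line s n hp
        simp only [List.foldl_cons]
        rw [show sumZeroesStepA (t, PySem.Int.mod pos 100) line = _ from
          stepA_eq line c cs t pos n hl hn, hs]
        simp only [bTotal]
        rw [ih ms _ _ hr]; ring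

-- under Pre_, the parse pass succeeds
theorem moves_isSome (data : List String) (hpre : Pre_sumZeroes data) :
    (sumZeroesMoves data).isSome := by
  induction data with
  | nil => simp [sumZeroesMoves]
  | cons line rest ih =>
    obtain ⟨hne, hn⟩ := hpre line List.mem_cons_self
    have hne' : line.toList ≠ [] := by
      simpa using (String.toList_inj (s₁ := line) (s₂ := "")).not.mpr hne
    have hr := ih (fun l hl => hpre l (List.mem_cons_of_mem _ hl))
    obtain ⟨ms, hms⟩ := Option.isSome_iff_exists.mp hr
    cases hl : line.toList with
    | nil => exact absurd hl hne'
    | cons c cs =>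
      have hg : PySem.Str.pyGet? line 0 = some c := by simp [pysem, hl]
      rw [hl] at hn
      obtain ⟨n, hn'⟩ := Option.isSome_iff_exists.mp hn
      simp only [List.drop_succ_cons, List.drop_zero] at hn'
      simp [sumZeroesMoves, sumZeroesParse, hl, hn', hms]

-- ===== VERDICT (by name: the statement is the Claim_ definition above) =====
theorem sumZeroes_spec : Claim_equal_sumZeroes := by
  intro data _ hpre
  obtain ⟨moves, hm⟩ := Option.isSome_iff_exists.mp (moves_isSome data hpre)
  have halt : sumZeroes_alt data = bTotal 50 moves := by
    unfold sumZeroes_alt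
    rw [hm]
    exact zipsum_eq_bTotal moves 50
  unfold Spec_sumZeroes sumZeroes
  rw [halt]
  have h := foldA_eq_bTotal data moves 0 50 hm
  rw [show PySem.Int.mod (50:Int) 100 = 50 from by decide] at h
  omega
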